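-- pv_equiv track=rewrite | github.com/liv-daliberti/maxent-grpo | src/maxent_grpo/training/trl_trainer.py | _token_prefix_search_order
-- ===== SOURCE A (Python) =====
-- from typing import Any, Callable, Dict, Iterable, List, Optional, Sequence, Tuple, Type, cast
--
-- def _token_prefix_search_order(target_len: int, max_len: int) -> List[int]:
--     """Return a small symmetric search window around a candidate prefix length."""
--
--     if max_len <= 0:
--         return []
--     bounded = max(1, min(target_len, max_len))
--     order = [bounded]
--     radius = 1
--     while radius <= 8:
--         lower = bounded - radius
--         upper = bounded + radius
--         if lower >= 1:
--             order.append(lower)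
--         if upper <= max_len:
--             order.append(upper)
--         radius += 1
--     if max_len not in order:
--         order.append(max_len)
--     return order
-- ===== SOURCE B (Python) =====
-- def _token_prefix_search_order(target_len: int, max_len: int):
--     """Closed-form candidate window sorted by (distance to center, value)."""
--     if max_len <= 0:
--         return []
--     b = max(1, min(target_len, max_len))
--     window = set(range(max(1, b - 8), min(max_len, b + 8) + 1))
--     window.add(max_len)
--     return sorted(window, key=lambda x: (abs(x - b), x))
-- ===== Notes on version B (the rewrite author's own statement) =====
-- stated objective: alternative
-- what changed: A's radius-1..8 while loop with per-radius boundary checks, incremental interleaved appends and a final membership test is replaced by a collect-then-sort pass: the candidates are one contiguous range [max(1,b-8), min(max_len,b+8)] plus max_len as a set, returned sorted by the key (abs(x-b), x), which reproduces the center-outward order with lower-before-upper ties and max_len at the tail.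
import Mathlib
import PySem

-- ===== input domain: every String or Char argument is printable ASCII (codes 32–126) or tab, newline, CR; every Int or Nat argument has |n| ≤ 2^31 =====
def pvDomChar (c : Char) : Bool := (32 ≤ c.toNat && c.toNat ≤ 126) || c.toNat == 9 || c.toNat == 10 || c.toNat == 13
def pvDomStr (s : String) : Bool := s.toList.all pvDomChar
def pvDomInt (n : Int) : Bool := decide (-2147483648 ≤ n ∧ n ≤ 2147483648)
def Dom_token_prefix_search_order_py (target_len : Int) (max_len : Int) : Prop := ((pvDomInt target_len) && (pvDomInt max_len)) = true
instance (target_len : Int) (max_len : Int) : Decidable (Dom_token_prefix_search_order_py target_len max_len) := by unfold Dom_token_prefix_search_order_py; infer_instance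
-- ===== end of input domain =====

-- B replaces A's radius loop with incremental appends and a membership test by a
-- collect-then-sort pass: one contiguous candidate range plus max_len, sorted by
-- the key (distance to the clamped center, value) (objective: alternative).

-- ===== PORT A =====
def token_prefix_search_order_py (target_len : Int) (max_len : Int) : List Int :=
  if max_len ≤ 0 then []
  else
    let bounded := max 1 (min target_len max_len)
    let order0 := [bounded]
    -- 'radius = 1; while radius <= 8: ...; radius += 1' = a fold of the body over range(1, 9)
    let order1 := (PySem.List.pyRange 1 9).foldl (fun order radius =>
      let lower := bounded - radius
      let upper := bounded + radius
      let order' := if lower ≥ 1 then order ++ [lower] else order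
      if upper ≤ max_len then order' ++ [upper] else order') order0
    if max_len ∈ order1 then order1 else order1 ++ [max_len]

-- ===== PORT B =====
def token_prefix_search_order_py_alt (target_len : Int) (max_len : Int) : List Int :=
  if max_len ≤ 0 then []
  else
    let b := max 1 (min target_len max_len)
    let window : PySem.Set Int :=
      PySem.Set.ofList (PySem.List.pyRange (max 1 (b - 8)) (min max_len (b + 8) + 1))
    let window := PySem.Set.add window max_len
    PySem.List.sorted2 window (fun x => |x - b|) (fun x => x)

-- ===== PRECONDITION & SPEC =====
def Spec_token_prefix_search_order_py (target_len : Int) (max_len : Int) (out : List Int) : Prop := out = token_prefix_search_order_py_alt target_len max_len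
instance (target_len : Int) (max_len : Int) (out : List Int) : Decidable (Spec_token_prefix_search_order_py target_len max_len out) := by unfold Spec_token_prefix_search_order_py; infer_instance

-- ===== CLAIM (what is proved, stated in full; the proofs are below) =====
def Claim_equal_token_prefix_search_order_py : Prop := ∀ (target_len : Int) (max_len : Int), Dom_token_prefix_search_order_py target_len max_len → Spec_token_prefix_search_order_py target_len max_len (token_prefix_search_order_py target_len max_len)

-- ===== LEMMAS AND PROOFS =====

/-- The window elements contributed by radii 1..n (without center and sentinel). -/
def pvCore (b m : Int) : Nat → List Int
  | 0 => []
  | n+1 =>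
      pvCore b m n
      ++ (if 1 ≤ b - ((n : Int) + 1) then [b - ((n : Int) + 1)] else [])
      ++ (if b + ((n : Int) + 1) ≤ m then [b + ((n : Int) + 1)] else [])

/-- A's while loop, folded over `range(1, n+1)`, produces the center followed by `pvCore`. -/
lemma pvLoopA (b m : Int) (n : Nat) :
    (PySem.List.pyRange 1 (1 + (n : Int))).foldl
      (fun order radius =>
        let lower := b - radius
        let upper := b + radius
        let order' := if lower ≥ 1 then order ++ [lower] else order
        if upper ≤ m then order' ++ [upper] else order') [b]
    = b :: pvCore b m n := by
  induction n with
  | zero =>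
      rw [PySem.List.pyRange_one_eq_nil (by norm_num)]
      simp [pvCore]
  | succ n ih =>
      rw [show ((n + 1 : Nat) : Int) = (n : Int) + 1 by push_cast; ring,
          show (1 + ((n : Int) + 1)) = (1 + (n : Int)) + 1 by ring,
          PySem.List.pyRange_one_succ_right (by omega : (1:Int) ≤ 1 + (n : Int)),
          List.foldl_append, ih]
      simp only [List.foldl_cons, List.foldl_nil, pvCore]
      rw [show b - (1 + (n : Int)) = b - ((n : Int) + 1) by ring,
          show b + (1 + (n : Int)) = b + ((n : Int) + 1) by ring]
      by_cases h1 : 1 ≤ b - ((n : Int) + 1) <;> by_cases h2 : b + ((n : Int) + 1) ≤ m <;>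
        simp [h1, h2, ge_iff_le]

/-- Membership in `pvCore`: the integers within radius n, clamped to [1, m], other than b. -/
lemma pvMemCore (b m x : Int) (hb : 1 ≤ b) (hbm : b ≤ m) :
    ∀ n : Nat, (x ∈ pvCore b m n ↔ (max 1 (b - (n : Int)) ≤ x ∧ x ≤ min m (b + (n : Int)) ∧ x ≠ b))
  | 0 => by simp [pvCore]; omega
  | n+1 => by
      have ih := pvMemCore b m x hb hbm n
      simp only [pvCore, List.mem_append]
      by_cases h1 : 1 ≤ b - ((n : Int) + 1) <;> by_cases h2 : b + ((n : Int) + 1) ≤ m <;>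
        simp only [h1, h2, if_true, if_false, List.mem_singleton,
          List.not_mem_nil, or_false] <;>
        rw [ih] <;> push_cast <;> omega

/-- Membership in the A-side window (center included). -/
lemma pvMemFull (b m : Int) (hb : 1 ≤ b) (hbm : b ≤ m) (n : Nat) (x : Int) :
    x ∈ b :: pvCore b m n ↔ max 1 (b - (n : Int)) ≤ x ∧ x ≤ min m (b + (n : Int)) := by
  have h0 : (0 : Int) ≤ (n : Int) := Int.natCast_nonneg n
  rw [List.mem_cons, pvMemCore b m x hb hbm n]
  omega

/-- The sort relation B's key induces: nearer to the center first, ties by value. -/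
def pvKlt (b a c : Int) : Prop := |a - b| < |c - b| ∨ (|a - b| = |c - b| ∧ a < c)

/-- Radius-(n+1) elements come strictly after every element within radius n. -/
lemma pvKlt_of_radius (b x y : Int) (n : Nat) (hx : |x - b| ≤ (n : Int))
    (hy : |y - b| = (n : Int) + 1) : pvKlt b x y := by
  left
  rw [hy]
  exact lt_of_le_of_lt hx (by omega)

/-- The A-side window is strictly increasing under B's sort key. -/
lemma pvPair (b m : Int) (hb : 1 ≤ b) (hbm : b ≤ m) (n : Nat) :
    (b :: pvCore b m n).Pairwise (pvKlt b) := by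
  induction n with
  | zero => simp [pvCore]
  | succ n ih =>
      have habsL : |b - ((n : Int) + 1) - b| = (n : Int) + 1 := by
        rw [show b - ((n : Int) + 1) - b = -((n : Int) + 1) by ring, abs_neg,
          abs_of_nonneg (by omega)]
      have habsU : |b + ((n : Int) + 1) - b| = (n : Int) + 1 := by
        rw [show b + ((n : Int) + 1) - b = (n : Int) + 1 by ring, abs_of_nonneg (by omega)]
      have hrw : (b :: pvCore b m (n+1))
          = (b :: pvCore b m n)
            ++ ((if 1 ≤ b - ((n : Int) + 1) then [b - ((n : Int) + 1)] else [])
              ++ (if b + ((n : Int) + 1) ≤ m then [b + ((n : Int) + 1)] else [])) := by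
        simp [pvCore]
      rw [hrw, List.pairwise_append]
      refine ⟨ih, ?_, ?_⟩
      · have hmid : pvKlt b (b - ((n : Int) + 1)) (b + ((n : Int) + 1)) :=
          Or.inr ⟨by rw [habsL, habsU], by omega⟩
        by_cases h1 : 1 ≤ b - ((n : Int) + 1) <;> by_cases h2 : b + ((n : Int) + 1) ≤ m <;>
          simp [h1, h2, hmid]
      · intro x hx y hy
        have hxb := (pvMemFull b m hb hbm n x).mp hx
        have hxabs : |x - b| ≤ (n : Int) := abs_le.mpr ⟨by omega, by omega⟩
        have hyv : y = b - ((n : Int) + 1) ∨ y = b + ((n : Int) + 1) := by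
          by_cases h1 : 1 ≤ b - ((n : Int) + 1) <;> by_cases h2 : b + ((n : Int) + 1) ≤ m <;>
            simp [h1, h2] at hy <;> tauto
        rcases hyv with rfl | rfl
        · exact pvKlt_of_radius b x _ n hxabs habsL
        · exact pvKlt_of_radius b x _ n hxabs habsU

/-- `pvKlt` never relates an element to itself, so a `pvKlt`-sorted list has no duplicates. -/
lemma pvKlt_ne (b a c : Int) (h : pvKlt b a c) : a ≠ c := by
  rintro rfl; unfold pvKlt at h; omega

/-- B's tuple key compared lexicographically is exactly `pvKlt`. -/
lemma pvKlt_iff_lex (b a c : Int) :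
    (toLex (|a - b|, a) < toLex (|c - b|, c)) ↔ pvKlt b a c := by
  rw [Prod.Lex.lt_iff]; rfl

/-- `sorted2` with the two component keys is `sorted` with the lexicographic pair key. -/
lemma pvSorted2_eq_sorted_lex (xs : List Int) (k1 k2 : Int → Int) :
    PySem.List.sorted2 xs k1 k2 = PySem.List.sorted xs (fun x => toLex (k1 x, k2 x)) := by
  unfold PySem.List.sorted2 PySem.List.sorted
  simp only [if_neg (by simp : ¬ (false = true))]
  congr 1
  funext acc x
  congr 1
  funext a c
  by_cases h1 : k1 a < k1 c <;> by_cases h2 : k1 c < k1 a <;> by_cases h3 : k2 a < k2 c <;>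
    simp [h1, h2, h3, Prod.Lex.lt_iff] <;> omega

-- ===== VERDICT (by name: the statement is the Claim_ definition above) =====
theorem token_prefix_search_order_py_spec : Claim_equal_token_prefix_search_order_py := by
  intro t m _
  unfold Spec_token_prefix_search_order_py token_prefix_search_order_py token_prefix_search_order_py_alt
  by_cases hm : m ≤ 0
  · simp [hm]
  · simp only [if_neg hm]
    have hb1 : (1:Int) ≤ max 1 (min t m) := le_max_left _ _
    have hbm : max 1 (min t m) ≤ m := by omega
    set b := max 1 (min t m) with hbdef
    have hA := pvLoopA b m 8
    norm_num at hA
    rw [hA, pvSorted2_eq_sorted_lex]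
    set S : List Int :=
      PySem.Set.add (PySem.Set.ofList (PySem.List.pyRange (max 1 (b - 8)) (min m (b + 8) + 1))) m
      with hSdef
    have hSnodup : S.Nodup :=
      PySem.Set.nodup_add _ m (PySem.Set.nodup_ofList _)
    have hSmem : ∀ x : Int, x ∈ S ↔ (max 1 (b - 8) ≤ x ∧ x ≤ min m (b + 8)) ∨ x = m := by
      intro x
      rw [hSdef, PySem.Set.mem_add, PySem.Set.mem_ofList, PySem.List.mem_pyRange_one]
      omega
    have hW := pvMemFull b m hb1 hbm 8
    have hMemIff : (m ∈ b :: pvCore b m 8) ↔ m - b ≤ 8 := by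
      rw [hW m]; push_cast; omega
    have hPair := pvPair b m hb1 hbm 8
    by_cases hc : m - b ≤ 8
    · rw [if_pos (hMemIff.mpr hc)]
      refine (PySem.List.sorted_eq_of_perm_of_pairwise_lt S (b :: pvCore b m 8)
        (fun x => toLex (|x - b|, x)) ?_ ?_).symm
      · rw [List.perm_ext_iff_of_nodup
          (hPair.imp (fun h => pvKlt_ne b _ _ h)) hSnodup]
        intro x
        rw [hW x, hSmem x]
        push_cast
        omega
      · exact hPair.imp (fun h => (pvKlt_iff_lex b _ _).mpr h)
    · rw [if_neg (fun h => hc (hMemIff.mp h))]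
      have hPair' : ((b :: pvCore b m 8) ++ [m]).Pairwise (pvKlt b) := by
        rw [List.pairwise_append]
        refine ⟨hPair, List.pairwise_singleton _ _, ?_⟩
        intro x hx y hy
        rw [List.mem_singleton] at hy
        have hxb := (hW x).mp hx
        have hxabs : |x - b| ≤ (8 : Int) := abs_le.mpr ⟨by push_cast at hxb; omega, by push_cast at hxb; omega⟩
        have hmabs : |m - b| = m - b := abs_of_nonneg (by omega)
        rw [hy]
        exact Or.inl (by rw [hmabs]; exact lt_of_le_of_lt hxabs (by omega))
      refine (PySem.List.sorted_eq_of_perm_of_pairwise_lt S ((b :: pvCore b m 8) ++ [m])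
        (fun x => toLex (|x - b|, x)) ?_ ?_).symm
      · rw [List.perm_ext_iff_of_nodup
          (hPair'.imp (fun h => pvKlt_ne b _ _ h)) hSnodup]
        intro x
        rw [List.mem_append, List.mem_singleton, hW x, hSmem x]
        push_cast
        omega
      · exact hPair'.imp (fun h => (pvKlt_iff_lex b _ _).mpr h)
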